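-- pv_equiv track=rewrite | github.com/PaulMakesStuff/Python-QR-Codes | QR.py | encode_numeric
-- ===== SOURCE A (Python) =====
-- def encode_numeric(input):
--     stream = ''
--     for i in range(0, len(input), 3):
--         triple = input[i:i+3]
--         if len(triple) == 3:
--             stream += format(int(triple), '010b')
--         elif len(triple) == 2:
--             stream += format(int(triple), '07b')
--         else:
--             stream += format(int(triple), '04b')
--     return stream
-- ===== SOURCE B (Python) =====
-- def encode_numeric(input):
--     # single left-to-right pass: Horner accumulator + counter state machine,
--     # no slicing, no per-chunk slicing-and-parse (int(ch) validates one digit at a time)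
--     parts = []
--     acc = 0
--     cnt = 0
--     for ch in input:
--         acc = acc * 10 + int(ch)
--         cnt += 1
--         if cnt == 3:
--             parts.append(format(acc, '010b'))
--             acc = 0
--             cnt = 0
--     if cnt == 2:
--         parts.append(format(acc, '07b'))
--     elif cnt == 1:
--         parts.append(format(acc, '04b'))
--     return ''.join(parts)
-- ===== Notes on version B (the rewrite author's own statement) =====
-- stated objective: alternative
-- what changed: A slices the string into 3-char chunks and parses each with int(); B never forms chunks: it is a single per-character state machine that Horner-accumulates acc = acc*10 + int(ch) with a counter, flushing a 10-bit code whenever the counter reaches 3 and a single 7/4-bit tail flush at the end.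
-- outside the precondition, e.g. on encode_numeric('+5'): A returns '0000101', B raises ValueError; on encode_numeric(' 7 '): A returns '0000000111', B raises ValueError; on encode_numeric('1_000'): A returns '00000010100000000', B raises ValueError
import Mathlib
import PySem

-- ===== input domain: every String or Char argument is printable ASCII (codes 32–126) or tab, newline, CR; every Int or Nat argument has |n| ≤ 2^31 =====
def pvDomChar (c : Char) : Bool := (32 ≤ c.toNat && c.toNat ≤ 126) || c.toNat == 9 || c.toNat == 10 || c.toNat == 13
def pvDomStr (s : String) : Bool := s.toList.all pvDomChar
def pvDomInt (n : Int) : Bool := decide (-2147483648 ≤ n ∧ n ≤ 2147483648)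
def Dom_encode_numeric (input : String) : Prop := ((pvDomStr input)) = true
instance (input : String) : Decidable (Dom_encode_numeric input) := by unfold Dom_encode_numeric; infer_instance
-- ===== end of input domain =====

-- B replaces A's slice-into-3-char-chunks + int() parsing by a single per-character
-- Horner-accumulator state machine with a counter (objective: alternative).


-- ===== PORT A =====
-- format(v, '0{w}b'): exact for v ≥ 0 (Pre_ guarantees the argument is a nonnegative int)
def pvFmtBin (v : Int) (w : Nat) : List Char :=
  let b := PySem.Int.toBinChars v
  List.replicate (w - b.length) '0' ++ b

-- 'for i in range(0, len(input), 3)' as the obvious index recursion with step 3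
def pvALoop (cs : List Char) (i : Nat) (stream : List Char) : List Char :=
  if i < cs.length then
    let triple := PySem.List.slice cs (some (i : Int)) (some ((i : Int) + 3))
    let v := (PySem.Int.ofChars? triple).getD 0   -- none = ValueError, excluded by Pre_
    let stream :=
      if triple.length = 3 then stream ++ pvFmtBin v 10
      else if triple.length = 2 then stream ++ pvFmtBin v 7
      else stream ++ pvFmtBin v 4
    pvALoop cs (i + 3) stream
  else stream
termination_by cs.length - i

def encode_numeric (input : String) : String :=
  String.ofList (pvALoop input.toList 0 [])

-- ===== PORT B =====
-- the 'for ch in input' state machine: (parts, acc, cnt) threaded through the characters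
def pvBLoop (cs : List Char) (parts : List (List Char)) (acc : Int) (cnt : Nat) :
    List (List Char) × Int × Nat :=
  match cs with
  | [] => (parts, acc, cnt)
  | ch :: rest =>
    let acc := acc * 10 + (PySem.Int.ofChars? [ch]).getD 0   -- int(ch); none = ValueError, excluded by Pre_
    let cnt := cnt + 1
    if cnt = 3 then pvBLoop rest (parts ++ [pvFmtBin acc 10]) 0 0
    else pvBLoop rest parts acc cnt

def encode_numeric_alt (input : String) : String :=
  let st := pvBLoop input.toList [] 0 0
  let parts := st.1
  let acc := st.2.1
  let cnt := st.2.2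
  let parts :=
    if cnt = 2 then parts ++ [pvFmtBin acc 7]
    else if cnt = 1 then parts ++ [pvFmtBin acc 4]
    else parts
  String.ofList parts.flatten

-- ===== PRECONDITION & SPEC =====
-- Pre_ excludes non-digit strings: on most of them A raises ValueError from int(); on the few
-- forms Python's int() still accepts (sign / whitespace / '_') A returns a value, but QR numeric
-- mode is only defined for digit strings, and B (reading raw code points) returns other values there.
def Pre_encode_numeric (input : String) : Prop := input.toList.all Char.isDigit = true
instance (input : String) : Decidable (Pre_encode_numeric input) := by
  unfold Pre_encode_numeric; infer_instance

def pvWitness_encode_numeric : String := "0472"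

def Spec_encode_numeric (input : String) (out : String) : Prop := out = encode_numeric_alt input
instance (input : String) (out : String) : Decidable (Spec_encode_numeric input out) := by
  unfold Spec_encode_numeric; infer_instance

-- ===== CLAIM (what is proved, stated in full; the proofs are below) =====
def Claim_equal_encode_numeric : Prop :=
  ∀ (input : String), Dom_encode_numeric input → Pre_encode_numeric input →
    Spec_encode_numeric input (encode_numeric input)

-- ===== LEMMAS AND PROOFS =====

-- A's per-chunk code (the loop body's branch applied to one slice)
def pvCodeA (t : List Char) : List Char :=
  let v := (PySem.Int.ofChars? t).getD 0
  if t.length = 3 then pvFmtBin v 10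
  else if t.length = 2 then pvFmtBin v 7
  else pvFmtBin v 4

-- A's loop as structural recursion on the remaining suffix
def pvChunksA (l : List Char) : List Char :=
  if l = [] then [] else pvCodeA (l.take 3) ++ pvChunksA (l.drop 3)
termination_by l.length
decreasing_by
  rename_i h
  have : l.length ≠ 0 := by simpa [List.length_eq_zero_iff] using h
  simp [List.length_drop]; omega

def pvChr (d : Nat) : Char := Char.ofNat (48 + d)

-- B's whole tail-flushed output from an arbitrary loop state
def pvBOut (l : List Char) (parts : List (List Char)) : List Char :=
  let st := pvBLoop l parts 0 0
  let parts := st.1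
  let acc := st.2.1
  let cnt := st.2.2
  (if cnt = 2 then parts ++ [pvFmtBin acc 7]
   else if cnt = 1 then parts ++ [pvFmtBin acc 4]
   else parts).flatten

theorem pvALoop_eq_chunks_aux : ∀ (k : Nat) (cs : List Char) (i : Nat) (stream : List Char),
    cs.length ≤ i + k → pvALoop cs i stream = stream ++ pvChunksA (cs.drop i) := by
  intro k
  induction k with
  | zero =>
    intro cs i stream hk
    rw [pvALoop]
    have h : ¬ i < cs.length := by omega
    have hd : cs.drop i = [] := by simp [List.drop_eq_nil_iff]; omega
    simp [h, hd, pvChunksA]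
  | succ k ih =>
    intro cs i stream hk
    by_cases h : i < cs.length
    · rw [pvALoop]
      simp only [h, if_pos]
      rw [ih cs (i + 3) _ (by omega)]
      have hsl : PySem.List.slice cs (some (i : Int)) (some ((i : Int) + 3))
          = (cs.drop i).take 3 := by
        have h3 : ((i : Int) + 3) = ((i : Int) + ((3 : Nat) : Int)) := by norm_cast
        rw [h3, PySem.List.slice_natCast_add]
      have hne : cs.drop i ≠ [] := by simp [List.drop_eq_nil_iff]; omega
      conv_rhs => rw [pvChunksA]
      simp only [hne, List.drop_drop]
      rw [hsl, pvCodeA]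
      split_ifs <;> simp_all [List.append_assoc]
    · rw [pvALoop]
      have hd : cs.drop i = [] := by simp [List.drop_eq_nil_iff]; omega
      simp [h, hd, pvChunksA]

theorem pvALoop_eq_chunks (cs : List Char) :
    pvALoop cs 0 [] = pvChunksA cs := by
  simpa using pvALoop_eq_chunks_aux cs.length cs 0 [] (by omega)

-- per-chunk agreement between A's code and the Horner value, all digit values, by kernel evaluation
theorem pvChunk3 : ∀ a < 10, ∀ b < 10, ∀ c < 10,
    pvCodeA [pvChr a, pvChr b, pvChr c]
      = pvFmtBin (100 * (a : Int) + 10 * (b : Int) + (c : Int)) 10 := by decide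

theorem pvChunk2 : ∀ a < 10, ∀ b < 10,
    pvCodeA [pvChr a, pvChr b] = pvFmtBin (10 * (a : Int) + (b : Int)) 7 := by decide

theorem pvChunk1 : ∀ a < 10, pvCodeA [pvChr a] = pvFmtBin ((a : Int)) 4 := by decide

theorem pvChrVal : ∀ d < 10, (PySem.Int.ofChars? [pvChr d]).getD 0 = (d : Int) := by decide

theorem pvDigit_ex (c : Char) (h : c.isDigit = true) : ∃ dn, dn < 10 ∧ c = pvChr dn := by
  have hb : 48 ≤ c.toNat ∧ c.toNat ≤ 57 := by
    simp [Char.isDigit, UInt32.le_iff_toNat_le] at h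
    exact ⟨h.1, h.2⟩
  refine ⟨c.toNat - 48, by omega, ?_⟩
  unfold pvChr
  have h48 : 48 + (c.toNat - 48) = c.toNat := by omega
  rw [h48, Char.ofNat_toNat]

theorem pvChunksA_nil : pvChunksA [] = [] := by rw [pvChunksA]; simp

-- the main invariant: B's state machine started at (parts, 0, 0) produces parts.flatten
-- followed by A's chunked encoding of the remaining characters
theorem pvMain : ∀ (k : Nat) (l : List Char), l.length ≤ k →
    (∀ c ∈ l, c.isDigit = true) →
    ∀ parts, pvBOut l parts = parts.flatten ++ pvChunksA l := by
  intro k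
  induction k with
  | zero =>
    intro l hk _ parts
    have : l = [] := by simpa [List.length_eq_zero_iff] using Nat.le_zero.mp hk
    subst this
    simp [pvBOut, pvBLoop, pvChunksA_nil]
  | succ k ih =>
    intro l hk hdig parts
    match l with
    | [] => simp [pvBOut, pvBLoop, pvChunksA_nil]
    | [a] =>
      obtain ⟨da, hda, rfl⟩ := pvDigit_ex a (hdig a (by simp))
      rw [pvChunksA]
      simp only [List.take_succ_cons, List.take_nil, List.drop_succ_cons, List.drop_nil,
        pvChunksA_nil, List.append_nil, reduceCtorEq]
      rw [pvChunk1 da hda]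
      simp [pvBOut, pvBLoop, pvChrVal da hda]
    | [a, b] =>
      obtain ⟨da, hda, rfl⟩ := pvDigit_ex a (hdig a (by simp))
      obtain ⟨db, hdb, rfl⟩ := pvDigit_ex b (hdig b (by simp))
      rw [pvChunksA]
      simp only [List.take_succ_cons, List.take_nil, List.drop_succ_cons, List.drop_nil,
        pvChunksA_nil, List.append_nil, reduceCtorEq]
      rw [pvChunk2 da hda db hdb]
      have h2 : (PySem.Int.ofChars? [pvChr da]).getD 0 * 10 + (PySem.Int.ofChars? [pvChr db]).getD 0
          = 10 * (da : Int) + (db : Int) := by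
        rw [pvChrVal da hda, pvChrVal db hdb]; ring
      simp [pvBOut, pvBLoop, h2]
    | a :: b :: c :: rest =>
      obtain ⟨da, hda, rfl⟩ := pvDigit_ex a (hdig _ (by simp))
      obtain ⟨db, hdb, rfl⟩ := pvDigit_ex b (hdig _ (by simp))
      obtain ⟨dc, hdc, rfl⟩ := pvDigit_ex c (hdig _ (by simp))
      have hrec := ih rest (by simp at hk; omega)
        (fun x hx => hdig x (by simp [hx]))
      rw [pvChunksA]
      simp only [List.take_succ_cons, List.take_zero, List.drop_succ_cons, List.drop_zero,
        reduceCtorEq]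
      rw [pvChunk3 da hda db hdb dc hdc]
      have hacc : ((0 * 10 + (PySem.Int.ofChars? [pvChr da]).getD 0) * 10 + (PySem.Int.ofChars? [pvChr db]).getD 0) * 10
            + (PySem.Int.ofChars? [pvChr dc]).getD 0
          = 100 * (da : Int) + 10 * (db : Int) + (dc : Int) := by
        rw [pvChrVal da hda, pvChrVal db hdb, pvChrVal dc hdc]; ring
      have hacc' : ((PySem.Int.ofChars? [pvChr da]).getD 0 * 10 + (PySem.Int.ofChars? [pvChr db]).getD 0) * 10
            + (PySem.Int.ofChars? [pvChr dc]).getD 0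
          = 100 * (da : Int) + 10 * (db : Int) + (dc : Int) := by
        rw [pvChrVal da hda, pvChrVal db hdb, pvChrVal dc hdc]; ring
      have hstep : pvBOut (pvChr da :: pvChr db :: pvChr dc :: rest) parts
          = pvBOut rest (parts ++ [pvFmtBin (100 * (da : Int) + 10 * (db : Int) + (dc : Int)) 10]) := by
        unfold pvBOut
        simp [pvBLoop, hacc']
      rw [hstep, hrec]
      simp [List.append_assoc]

-- ===== VERDICT (by name: the statement is the Claim_ definition above) =====
theorem encode_numeric_spec : Claim_equal_encode_numeric := by
  unfold Claim_equal_encode_numeric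
  intro input _ hpre
  unfold Spec_encode_numeric encode_numeric encode_numeric_alt
  rw [pvALoop_eq_chunks]
  have hdig : ∀ c ∈ input.toList, c.isDigit = true := fun c hc =>
    List.all_eq_true.mp hpre c hc
  have := pvMain input.toList.length input.toList (le_refl _) hdig []
  simp only [List.flatten_nil, List.nil_append] at this
  simpa [pvBOut] using congrArg String.ofList this.symm
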